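-- pv_equiv track=rewrite | github.com/VishnuDhaya/orange_money | orange_money.py | find_accno
-- ===== SOURCE A (Python) =====
-- def find_accno(rf):
--     boa_accno = [
--         '0325186587'
--     ]
--     tdr_accno = [
--         '0322285302'
--     ]
--     prt_accno = [
--         '0322284219'
--     ]
--     agent_accno = [
--         '0323847965',
--         '0321550231',
--         '0322285302',
--         '0324266121',
--         '0322646571',
--         '0324812678',
--         '0327131771',
--         '0328044684',
--         '0322646537',
--         '0327134631',
--         '0327134320',
--         '0324266121',
--     ]
--     for x in boa_accno:
--         if x == rf:
--             return "boa"
--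
--     for x in tdr_accno:
--         if x == rf:
--             return "tdr"
--
--     for x in prt_accno:
--         if x == rf:
--             return "prt"
--
--     for x in agent_accno:
--         if x == rf:
--             return "agent"
-- ===== SOURCE B (Python) =====
-- def find_accno(rf):
--     # Fixed table of (account, category), unique keys sorted ascending;
--     # the duplicate '0322285302' resolves to 'tdr' (A's priority order).
--     table = [
--         ('0321550231', 'agent'),
--         ('0322284219', 'prt'),
--         ('0322285302', 'tdr'),
--         ('0322646537', 'agent'),
--         ('0322646571', 'agent'),
--         ('0323847965', 'agent'),
--         ('0324266121', 'agent'),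
--         ('0324812678', 'agent'),
--         ('0325186587', 'boa'),
--         ('0327131771', 'agent'),
--         ('0327134320', 'agent'),
--         ('0327134631', 'agent'),
--         ('0328044684', 'agent'),
--     ]
--     lo, hi = 0, len(table)
--     while lo < hi:
--         mid = (lo + hi) // 2
--         if table[mid][0] < rf:
--             lo = mid + 1
--         else:
--             hi = mid
--     if lo < len(table) and table[lo][0] == rf:
--         return table[lo][1]
-- ===== Notes on version B (the rewrite author's own statement) =====
-- stated objective: alternative
-- what changed: Replaces A's four sequential membership-scan loops with one sorted (account, category) table (priority resolved at table-construction: the duplicate '0322285302' maps to 'tdr') and an iterative binary search followed by a single equality check.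
import Mathlib
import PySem

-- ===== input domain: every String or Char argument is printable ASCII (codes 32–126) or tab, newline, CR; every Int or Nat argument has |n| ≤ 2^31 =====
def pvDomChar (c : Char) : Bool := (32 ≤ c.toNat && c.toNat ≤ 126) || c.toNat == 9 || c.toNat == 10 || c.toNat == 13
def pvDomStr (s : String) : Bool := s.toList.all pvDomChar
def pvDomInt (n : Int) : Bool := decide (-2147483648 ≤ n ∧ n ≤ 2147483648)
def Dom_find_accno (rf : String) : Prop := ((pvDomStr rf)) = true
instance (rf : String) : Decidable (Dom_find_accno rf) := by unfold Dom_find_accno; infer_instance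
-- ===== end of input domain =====

-- B replaces A's four sequential scan loops by binary search in one sorted
-- (account, category) table with priorities resolved at construction (alternative
-- algorithm, same cost at this size); return values are proved equal everywhere.

-- ===== PORT A =====
-- 'for x in l: if x == rf: return v' as structural recursion over l
def pvScanRet (xs : List String) (rf : String) (v : String) : Option String :=
  match xs with
  | [] => none
  | x :: rest => if x == rf then some v else pvScanRet rest rf v

def find_accno (rf : String) : Option String :=
  let boa_accno := ["0325186587"]
  let tdr_accno := ["0322285302"]
  let prt_accno := ["0322284219"]
  let agent_accno := ["0323847965", "0321550231", "0322285302", "0324266121",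
    "0322646571", "0324812678", "0327131771", "0328044684",
    "0322646537", "0327134631", "0327134320", "0324266121"]
  match pvScanRet boa_accno rf "boa" with
  | some r => some r
  | none =>
  match pvScanRet tdr_accno rf "tdr" with
  | some r => some r
  | none =>
  match pvScanRet prt_accno rf "prt" with
  | some r => some r
  | none =>
  match pvScanRet agent_accno rf "agent" with
  | some r => some r
  | none => none

-- ===== PORT B =====
-- Source B's 'while lo < hi' binary-search loop; fuel bounds the iteration count
-- (6 ≥ ⌈log2 13⌉+1 iterations always suffice for hi ≤ 13, so the port is exact).
def pvBisect (t : List (String × String)) (rf : String) : Nat → Nat → Nat → Nat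
  | 0, lo, _ => lo
  | fuel+1, lo, hi =>
    if lo < hi then
      let mid := (lo + hi) / 2
      if PySem.Chars.strLt (t.getD mid ("", "")).1.toList rf.toList then pvBisect t rf fuel (mid + 1) hi
      else pvBisect t rf fuel lo mid
    else lo

def pvTable : List (String × String) :=
  [("0321550231", "agent"), ("0322284219", "prt"), ("0322285302", "tdr"),
   ("0322646537", "agent"), ("0322646571", "agent"), ("0323847965", "agent"),
   ("0324266121", "agent"), ("0324812678", "agent"), ("0325186587", "boa"),
   ("0327131771", "agent"), ("0327134320", "agent"), ("0327134631", "agent"),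
   ("0328044684", "agent")]

def find_accno_alt (rf : String) : Option String :=
  let lo := pvBisect pvTable rf 6 0 pvTable.length
  if lo < pvTable.length then
    if (pvTable.getD lo ("", "")).1 == rf then some (pvTable.getD lo ("", "")).2
    else none
  else none

-- ===== PRECONDITION & SPEC =====
def Spec_find_accno (rf : String) (out : Option String) : Prop := out = find_accno_alt rf
instance (rf : String) (out : Option String) : Decidable (Spec_find_accno rf out) := by unfold Spec_find_accno; infer_instance

-- ===== CLAIM (what is proved, stated in full; the proofs are below) =====
def Claim_equal_find_accno : Prop := ∀ (rf : String), Dom_find_accno rf → Spec_find_accno rf (find_accno rf)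

-- ===== LEMMAS AND PROOFS =====

-- ===== VERDICT (by name: the statement is the Claim_ definition above) =====
set_option maxHeartbeats 1600000 in
theorem find_accno_spec : Claim_equal_find_accno := by
  intro rf _
  unfold Spec_find_accno
  by_cases h1 : ("0321550231" == rf) = true
  · obtain rfl := eq_of_beq h1; decide
  by_cases h2 : ("0322284219" == rf) = true
  · obtain rfl := eq_of_beq h2; decide
  by_cases h3 : ("0322285302" == rf) = true
  · obtain rfl := eq_of_beq h3; decide
  by_cases h4 : ("0322646537" == rf) = true
  · obtain rfl := eq_of_beq h4; decide
  by_cases h5 : ("0322646571" == rf) = true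
  · obtain rfl := eq_of_beq h5; decide
  by_cases h6 : ("0323847965" == rf) = true
  · obtain rfl := eq_of_beq h6; decide
  by_cases h7 : ("0324266121" == rf) = true
  · obtain rfl := eq_of_beq h7; decide
  by_cases h8 : ("0324812678" == rf) = true
  · obtain rfl := eq_of_beq h8; decide
  by_cases h9 : ("0325186587" == rf) = true
  · obtain rfl := eq_of_beq h9; decide
  by_cases h10 : ("0327131771" == rf) = true
  · obtain rfl := eq_of_beq h10; decide
  by_cases h11 : ("0327134320" == rf) = true
  · obtain rfl := eq_of_beq h11; decide
  by_cases h12 : ("0327134631" == rf) = true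
  · obtain rfl := eq_of_beq h12; decide
  by_cases h13 : ("0328044684" == rf) = true
  · obtain rfl := eq_of_beq h13; decide
  have hA : find_accno rf = none := by
    unfold find_accno
    simp only [pvScanRet]
    rw [if_neg h9, if_neg h3, if_neg h2, if_neg h6, if_neg h1, if_neg h3, if_neg h7,
        if_neg h5, if_neg h8, if_neg h10, if_neg h13, if_neg h4, if_neg h12,
        if_neg h11, if_neg h7]
  have hB : find_accno_alt rf = none := by
    unfold find_accno_alt pvTable
    simp only [pvBisect, List.length, Nat.reduceAdd, Nat.reduceDiv, Nat.reduceLT, reduceIte, List.getD,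
               List.getElem?_cons_zero, List.getElem?_cons_succ, Option.getD_some]
    split_ifs <;> first | rfl | omega | simp_all
  rw [hA, hB]
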